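-- pv_equiv track=rewrite | github.com/S-Christensen/cartographersStudy | backend/scoringCards.py | shieldgate
-- ===== SOURCE A (Python) =====
-- def dfs(grid, row, col, visited, terrain_type):
--     stack = [(row, col)]
--     cluster = []
--
--     while stack:
--         r, c = stack.pop()
--         if (r, c) not in visited and grid[r][c] == terrain_type:
--             visited.add((r, c))
--             cluster.append((r, c))
--             for dr, dc in [(1, 0), (-1, 0), (0, 1), (0, -1)]:
--                 nr, nc = r + dr, c + dc
--                 if 0 <= nr < len(grid) and 0 <= nc < len(grid[0]):
--                     stack.append((nr, nc))
--     return cluster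
--
-- def shieldgate(grid):
--     visited = set()
--     clusters = []
--
--     for r in range(len(grid)):
--         for c in range(len(grid[0])):
--             if (r, c) not in visited and grid[r][c] == "Village":
--                 cluster = dfs(grid, r, c, visited, "Village")
--                 clusters.append(cluster)
--
--     clusters.sort(key=len, reverse=True)
--     if len(clusters) >= 2:
--         return len(clusters[1]) * 2
--     return 0
-- ===== SOURCE B (Python) =====
-- def shieldgate(grid):
--     H = len(grid)
--     W = len(grid[0]) if grid else 0
--     best = 0
--     second = 0
--     seen = set()
--     for r in range(H):
--         for c in range(W):
--             if grid[r][c] == "Village" and (r, c) not in seen: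
--                 comp = {(r, c)}
--                 frontier = [(r, c)]
--                 while frontier:
--                     nxt = []
--                     for (x, y) in frontier:
--                         for (nx, ny) in ((x + 1, y), (x - 1, y), (x, y + 1), (x, y - 1)):
--                             if 0 <= nx < H and 0 <= ny < W and (nx, ny) not in comp and grid[nx][ny] == "Village":
--                                 comp.add((nx, ny))
--                                 nxt.append((nx, ny))
--                     frontier = nxt
--                 seen |= comp
--                 s = len(comp)
--                 if s > best:
--                     best, second = s, best
--                 elif s > second:
--                     second = s
--     return second * 2
-- ===== Notes on version B (the rewrite author's own statement) =====
-- stated objective: alternative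
-- what changed: Replaces the per-component DFS with an explicit stack (and final sort of the cluster list) by a frontier-by-levels BFS that grows a set, keeping only a running top-two of component sizes instead of sorting.
import Mathlib
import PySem

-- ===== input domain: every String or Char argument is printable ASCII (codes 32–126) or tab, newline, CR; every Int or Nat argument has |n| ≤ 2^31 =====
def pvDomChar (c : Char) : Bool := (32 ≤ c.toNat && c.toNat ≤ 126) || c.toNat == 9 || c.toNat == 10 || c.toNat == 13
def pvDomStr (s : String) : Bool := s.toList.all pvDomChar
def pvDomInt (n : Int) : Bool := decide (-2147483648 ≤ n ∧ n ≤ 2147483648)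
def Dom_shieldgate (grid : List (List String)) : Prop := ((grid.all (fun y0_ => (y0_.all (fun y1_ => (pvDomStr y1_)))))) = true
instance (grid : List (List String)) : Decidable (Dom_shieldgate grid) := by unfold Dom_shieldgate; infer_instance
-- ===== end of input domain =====

-- B replaces A's per-component DFS stack + final sort by a frontier-by-levels BFS
-- with a running top-two of the component sizes (alternative algorithm, same cost).

-- ===== PORT A =====
-- grid[r][c]; total form, exact under Pre_ (all indices used are in range there)
def pvVget (grid : List (List String)) (r c : Int) : String :=
  PySem.List.pyGetD (PySem.List.pyGetD grid r []) c ""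

-- [(1, 0), (-1, 0), (0, 1), (0, -1)]
def pvDirs : List (Int × Int) := [(1, 0), (-1, 0), (0, 1), (0, -1)]

-- the inner 'for dr, dc in [...]' of dfs: push in-range neighbours on the stack
def pvPush (grid : List (List String)) (r c : Int) (st0 : List (Int × Int)) : List (Int × Int) :=
  pvDirs.foldl (fun st d =>
    if 0 ≤ r + d.1 ∧ r + d.1 < (grid.length : Int) ∧ 0 ≤ c + d.2 ∧ c + d.2 < ((PySem.List.pyGetD grid 0 []).length : Int)
    then (r + d.1, c + d.2) :: st else st) st0

-- the 'while stack' loop of dfs; head of the list = top of the Python stack.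
-- fuel is a totality guard only: it is proved below never to run out.
def pvDfsLoop (grid : List (List String)) (terrain : String) :
    Nat → List (Int × Int) → PySem.Set (Int × Int) → List (Int × Int) →
    List (Int × Int) × PySem.Set (Int × Int)
  | 0, _, visited, cluster => (cluster, visited)
  | _ + 1, [], visited, cluster => (cluster, visited)
  | fuel + 1, (r, c) :: rest, visited, cluster =>
      if (r, c) ∉ visited ∧ pvVget grid r c = terrain then
        pvDfsLoop grid terrain fuel (pvPush grid r c rest)
          (PySem.Set.add visited (r, c)) (cluster ++ [(r, c)])
      else
        pvDfsLoop grid terrain fuel rest visited cluster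

def pvDfs (grid : List (List String)) (row col : Int) (visited : PySem.Set (Int × Int))
    (terrain : String) : List (Int × Int) × PySem.Set (Int × Int) :=
  pvDfsLoop grid terrain (5 * (grid.length * (PySem.List.pyGetD grid 0 []).length) + 1)
    [(row, col)] visited []

def shieldgate (grid : List (List String)) : Int :=
  let st := (PySem.List.pyRange 0 (grid.length : Int) 1).foldl (fun st r =>
    (PySem.List.pyRange 0 ((PySem.List.pyGetD grid 0 []).length : Int) 1).foldl (fun st c =>
      if (r, c) ∉ st.1 ∧ pvVget grid r c = "Village" then
        let p := pvDfs grid r c st.1 "Village"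
        (p.2, st.2 ++ [p.1])
      else st) st)
    ((PySem.Set.empty : PySem.Set (Int × Int)), ([] : List (List (Int × Int))))
  let clusters := PySem.List.sorted st.2 (fun cl => (cl.length : Int)) true
  if 2 ≤ clusters.length then ((PySem.List.pyGetD clusters 1 []).length : Int) * 2 else 0

-- ===== PORT B =====
-- ((x+1, y), (x-1, y), (x, y+1), (x, y-1))
def pvNbrs (x y : Int) : List (Int × Int) := [(x + 1, y), (x - 1, y), (x, y + 1), (x, y - 1)]

-- body of 'for (x, y) in frontier': add unseen in-range Village neighbours to comp and nxt
def pvGrow (grid : List (List String)) (H W : Int)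
    (cn : PySem.Set (Int × Int) × List (Int × Int)) (p : Int × Int) :
    PySem.Set (Int × Int) × List (Int × Int) :=
  (pvNbrs p.1 p.2).foldl (fun cn q =>
    if 0 ≤ q.1 ∧ q.1 < H ∧ 0 ≤ q.2 ∧ q.2 < W ∧ q ∉ cn.1 ∧ pvVget grid q.1 q.2 = "Village"
    then (PySem.Set.add cn.1 q, cn.2 ++ [q]) else cn) cn

-- the 'while frontier' loop; fuel is a totality guard only (proved sufficient below)
def pvBfs (grid : List (List String)) (H W : Int) :
    Nat → List (Int × Int) → PySem.Set (Int × Int) → PySem.Set (Int × Int)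
  | 0, _, comp => comp
  | _ + 1, [], comp => comp
  | fuel + 1, q :: fr, comp =>
      let p := (q :: fr).foldl (pvGrow grid H W) (comp, [])
      pvBfs grid H W fuel p.2 p.1

def shieldgate_alt (grid : List (List String)) : Int :=
  let H := grid.length
  let W := if grid.isEmpty then 0 else (PySem.List.pyGetD grid 0 []).length
  let st := (PySem.List.pyRange 0 (H : Int) 1).foldl (fun st r =>
    (PySem.List.pyRange 0 (W : Int) 1).foldl (fun st c =>
      if pvVget grid r c = "Village" ∧ (r, c) ∉ st.1 then
        let comp := pvBfs grid (H : Int) (W : Int) (H * W + 1) [(r, c)] (PySem.Set.ofList [(r, c)])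
        let seen := PySem.Set.union st.1 comp
        let s : Int := PySem.Set.len comp
        if s > st.2.1 then (seen, s, st.2.1)
        else if s > st.2.2 then (seen, st.2.1, s)
        else (seen, st.2.1, st.2.2)
      else st) st)
    ((PySem.Set.empty : PySem.Set (Int × Int)), (0 : Int), (0 : Int))
  st.2.2 * 2

-- ===== PRECONDITION & SPEC =====
-- Pre_ excludes exactly the ragged grids on which A raises IndexError (a row shorter
-- than row 0 is always reached and indexed out of range); A returns on all other inputs.
def Pre_shieldgate (grid : List (List String)) : Prop :=
  ∀ row ∈ grid, (grid.headD []).length ≤ row.length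
instance (grid : List (List String)) : Decidable (Pre_shieldgate grid) := by
  unfold Pre_shieldgate; infer_instance

def pvWitness_shieldgate : List (List String) :=
  [["Village", "Forest"], ["Water", "Village"]]

def Spec_shieldgate (grid : List (List String)) (out : Int) : Prop := out = shieldgate_alt grid
instance (grid : List (List String)) (out : Int) : Decidable (Spec_shieldgate grid out) := by
  unfold Spec_shieldgate; infer_instance

-- ===== CLAIM (what is proved, stated in full; the proofs are below) =====
def Claim_equal_shieldgate : Prop :=
  ∀ (grid : List (List String)), Dom_shieldgate grid → Pre_shieldgate grid →
    Spec_shieldgate grid (shieldgate grid)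

-- ===== LEMMAS AND PROOFS =====

-- in-range positions, adjacency, the step relation and reachability within "Village" cells
def pvInb (grid : List (List String)) (p : Int × Int) : Prop :=
  0 ≤ p.1 ∧ p.1 < (grid.length : Int) ∧ 0 ≤ p.2 ∧ p.2 < ((PySem.List.pyGetD grid 0 []).length : Int)

def pvAdj (p q : Int × Int) : Prop :=
  (q.1 = p.1 + 1 ∧ q.2 = p.2) ∨ (q.1 = p.1 - 1 ∧ q.2 = p.2) ∨
  (q.1 = p.1 ∧ q.2 = p.2 + 1) ∨ (q.1 = p.1 ∧ q.2 = p.2 - 1)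

def pvStep (grid : List (List String)) (p q : Int × Int) : Prop :=
  pvInb grid p ∧ pvInb grid q ∧ pvVget grid p.1 p.2 = "Village" ∧
    pvVget grid q.1 q.2 = "Village" ∧ pvAdj p q

def pvReach (grid : List (List String)) (p q : Int × Int) : Prop :=
  Relation.ReflTransGen (pvStep grid) p q

def pvCellList (grid : List (List String)) : List (Int × Int) :=
  (PySem.List.pyRange 0 (grid.length : Int) 1).flatMap
    (fun r => (PySem.List.pyRange 0 ((PySem.List.pyGetD grid 0 []).length : Int) 1).map (fun c => (r, c)))

def pvU (grid : List (List String)) (visited : List (Int × Int)) : Nat :=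
  ((pvCellList grid).filter (fun p => decide (p ∉ visited))).length

theorem pvAdj_symm (p q : Int × Int) : pvAdj p q → pvAdj q p := by
  unfold pvAdj; intro h; rcases p with ⟨a, b⟩; rcases q with ⟨x, y⟩; simp_all; omega

theorem pvStep_symm (grid : List (List String)) (p q : Int × Int) :
    pvStep grid p q → pvStep grid q p := by
  unfold pvStep; intro h; exact ⟨h.2.1, h.1, h.2.2.2.1, h.2.2.1, pvAdj_symm _ _ h.2.2.2.2⟩

theorem pvReach_symm (grid : List (List String)) (p q : Int × Int) :
    pvReach grid p q → pvReach grid q p := by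
  intro h
  induction h with
  | refl => exact Relation.ReflTransGen.refl
  | tail _ hs ih =>
      exact Relation.ReflTransGen.trans
        (Relation.ReflTransGen.single (pvStep_symm _ _ _ hs)) ih

-- minimality: a step-closed set containing the seed contains everything reachable
theorem pvReach_subset (grid : List (List String)) (S : Int × Int → Prop) (seed : Int × Int)
    (hseed : S seed) (hcl : ∀ x y, S x → pvStep grid x y → S y) :
    ∀ t, pvReach grid seed t → S t := by
  intro t h
  induction h with
  | refl => exact hseed
  | tail _ hs ih => exact hcl _ _ ih hs

theorem mem_pvCellList (grid : List (List String)) (p : Int × Int) :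
    p ∈ pvCellList grid ↔ pvInb grid p := by
  unfold pvCellList pvInb
  rcases p with ⟨a, b⟩
  simp only [List.mem_flatMap, List.mem_map, PySem.List.mem_pyRange_one, Prod.mk.injEq]
  constructor
  · rintro ⟨r, hr, c, hc, h1, h2⟩
    subst h1; subst h2; exact ⟨hr.1, hr.2, hc.1, hc.2⟩
  · rintro ⟨h1, h2, h3, h4⟩
    exact ⟨a, ⟨h1, h2⟩, b, ⟨h3, h4⟩, rfl, rfl⟩

theorem pvFilt_le {α : Type} (l : List α) (p q : α → Bool) (h : ∀ x ∈ l, p x → q x) :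
    (l.filter p).length ≤ (l.filter q).length := by
  induction l with
  | nil => simp
  | cons a t ih =>
      have ht : ∀ x ∈ t, p x → q x := fun x hx => h x (List.mem_cons_of_mem _ hx)
      by_cases hp : p a
      · have hq : q a := h a (List.mem_cons_self) hp
        simp [List.filter_cons, hp, hq]; exact ih ht
      · by_cases hq : q a <;> simp [List.filter_cons, hp, hq] <;>
          have := ih ht <;> omega

theorem pvFilt_lt {α : Type} (l : List α) (p q : α → Bool) (h : ∀ x ∈ l, p x → q x)
    (a : α) (ha : a ∈ l) (hqa : q a = true) (hpa : p a = false) :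
    (l.filter p).length < (l.filter q).length := by
  induction l with
  | nil => simp at ha
  | cons b t ih =>
      have ht : ∀ x ∈ t, p x → q x := fun x hx => h x (List.mem_cons_of_mem _ hx)
      rcases List.mem_cons.1 ha with rfl | hat
      · have := pvFilt_le t p q ht
        simp [List.filter_cons, hqa, hpa]; omega
      · have := ih ht hat
        by_cases hp : p b
        · have hq : q b := h b (List.mem_cons_self) hp
          simp [List.filter_cons, hp, hq]; omega
        · by_cases hq : q b <;> simp [List.filter_cons, hp, hq] <;> omega

theorem pvU_lt (grid : List (List String)) (v v' : List (Int × Int)) (p : Int × Int)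
    (hmono : ∀ q, q ∈ v → q ∈ v') (hp : pvInb grid p) (hpv : p ∉ v) (hpv' : p ∈ v') :
    pvU grid v' < pvU grid v := by
  apply pvFilt_lt _ _ _ ?_ p ((mem_pvCellList grid p).2 hp)
  · simp [hpv]
  · simp [hpv']
  · intro x _ hx
    simp only [decide_eq_true_eq] at *
    exact fun hxv => hx (hmono x hxv)

-- characterization of the neighbour pushes of port A's dfs
theorem pvPushAux (grid : List (List String)) (r c : Int) (D : List (Int × Int)) :
    ∀ st : List (Int × Int),
      (∀ q, q ∈ D.foldl (fun st d =>
          if 0 ≤ r + d.1 ∧ r + d.1 < (grid.length : Int) ∧ 0 ≤ c + d.2 ∧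
              c + d.2 < ((PySem.List.pyGetD grid 0 []).length : Int)
          then (r + d.1, c + d.2) :: st else st) st ↔
        (∃ d ∈ D, q = (r + d.1, c + d.2) ∧ pvInb grid q) ∨ q ∈ st) ∧
      (D.foldl (fun st d =>
          if 0 ≤ r + d.1 ∧ r + d.1 < (grid.length : Int) ∧ 0 ≤ c + d.2 ∧
              c + d.2 < ((PySem.List.pyGetD grid 0 []).length : Int)
          then (r + d.1, c + d.2) :: st else st) st).length ≤ st.length + D.length := by
  induction D with
  | nil => intro st; simp
  | cons d t ih =>
      intro st
      simp only [List.foldl_cons]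
      by_cases hc : 0 ≤ r + d.1 ∧ r + d.1 < (grid.length : Int) ∧ 0 ≤ c + d.2 ∧
          c + d.2 < ((PySem.List.pyGetD grid 0 []).length : Int)
      · rw [if_pos hc]
        refine ⟨fun q => ?_, ?_⟩
        · rw [(ih ((r + d.1, c + d.2) :: st)).1 q]
          simp only [List.mem_cons]
          constructor
          · rintro (⟨d', hd', h1, h2⟩ | (rfl | hq))
            · exact Or.inl ⟨d', Or.inr hd', h1, h2⟩
            · exact Or.inl ⟨d, Or.inl rfl, rfl, ⟨hc.1, hc.2.1, hc.2.2.1, hc.2.2.2⟩⟩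
            · exact Or.inr hq
          · rintro (⟨d', hd', h1, h2⟩ | hq)
            · rcases hd' with rfl | hd'
              · exact Or.inr (Or.inl h1)
              · exact Or.inl ⟨d', hd', h1, h2⟩
            · exact Or.inr (Or.inr hq)
        · have := (ih ((r + d.1, c + d.2) :: st)).2
          simp at this ⊢; omega
      · rw [if_neg hc]
        refine ⟨fun q => ?_, ?_⟩
        · rw [(ih st).1 q]
          constructor
          · rintro (⟨d', hd', h1, h2⟩ | hq)
            · exact Or.inl ⟨d', List.mem_cons_of_mem _ hd', h1, h2⟩
            · exact Or.inr hq
          · rintro (⟨d', hd', h1, h2⟩ | hq)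
            · rcases List.mem_cons.1 hd' with rfl | hd'
              · subst h1; exact absurd h2 hc
              · exact Or.inl ⟨d', hd', h1, h2⟩
            · exact Or.inr hq
        · have := (ih st).2
          simp only [List.length_cons]; omega

theorem mem_pvPush (grid : List (List String)) (r c : Int) (st : List (Int × Int)) (q : Int × Int) :
    q ∈ pvPush grid r c st ↔ (pvInb grid q ∧ pvAdj (r, c) q) ∨ q ∈ st := by
  rw [pvPush, (pvPushAux grid r c pvDirs st).1 q]
  constructor
  · rintro (⟨d, hd, h1, h2⟩ | hq)
    · refine Or.inl ⟨h2, ?_⟩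
      subst h1
      unfold pvDirs at hd
      unfold pvAdj
      simp at hd
      rcases hd with rfl | rfl | rfl | rfl <;> simp <;> omega
    · exact Or.inr hq
  · rintro (⟨h1, h2⟩ | hq)
    · refine Or.inl ?_
      rcases q with ⟨x, y⟩
      unfold pvAdj at h2
      unfold pvDirs
      rcases h2 with ⟨ha, hb⟩ | ⟨ha, hb⟩ | ⟨ha, hb⟩ | ⟨ha, hb⟩
      · exact ⟨(1, 0), by simp, by simp [Prod.ext_iff]; omega, h1⟩
      · exact ⟨(-1, 0), by simp, by simp [Prod.ext_iff]; omega, h1⟩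
      · exact ⟨(0, 1), by simp, by simp [Prod.ext_iff]; omega, h1⟩
      · exact ⟨(0, -1), by simp, by simp [Prod.ext_iff]; omega, h1⟩
    · exact Or.inr hq

theorem length_pvPush (grid : List (List String)) (r c : Int) (st : List (Int × Int)) :
    (pvPush grid r c st).length ≤ st.length + 4 := by
  have := (pvPushAux grid r c pvDirs st).2
  rw [pvPush]
  simpa [pvDirs] using this

theorem pvReach_props (grid : List (List String)) (seed x : Int × Int)
    (hI : pvInb grid seed) (hV : pvVget grid seed.1 seed.2 = "Village")
    (h : pvReach grid seed x) : pvInb grid x ∧ pvVget grid x.1 x.2 = "Village" := by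
  induction h with
  | refl => exact ⟨hI, hV⟩
  | tail _ hs _ => exact ⟨hs.2.1, hs.2.2.2.1⟩

theorem pvDfsLoop_spec (grid : List (List String)) (vis₀ : List (Int × Int)) (seed : Int × Int)
    (hseedI : pvInb grid seed) (hseedV : pvVget grid seed.1 seed.2 = "Village")
    (hseed₀ : seed ∉ vis₀)
    (hcl₀ : ∀ x y, x ∈ vis₀ → pvStep grid x y → y ∈ vis₀) :
    ∀ (fuel : Nat) (stack : List (Int × Int)) (visited : PySem.Set (Int × Int))
      (cluster : List (Int × Int)),
      (∀ p, p ∈ visited ↔ p ∈ vis₀ ∨ p ∈ cluster) →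
      cluster.Nodup →
      (∀ x ∈ cluster, pvReach grid seed x) →
      (∀ y ∈ stack, pvInb grid y ∧ (y = seed ∨ ∃ x ∈ cluster, pvAdj x y)) →
      (∀ x ∈ cluster, ∀ y, pvInb grid y → pvVget grid y.1 y.2 = "Village" → pvAdj x y →
          y ∈ visited ∨ y ∈ stack) →
      (seed ∈ cluster ∨ seed ∈ stack) →
      5 * pvU grid visited + stack.length ≤ fuel →
      (pvDfsLoop grid "Village" fuel stack visited cluster).1.Nodup ∧
      (∀ p, p ∈ (pvDfsLoop grid "Village" fuel stack visited cluster).1 ↔ pvReach grid seed p) ∧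
      (∀ p, p ∈ (pvDfsLoop grid "Village" fuel stack visited cluster).2 ↔
          p ∈ vis₀ ∨ p ∈ (pvDfsLoop grid "Village" fuel stack visited cluster).1) := by
  have final : ∀ (visited : PySem.Set (Int × Int)) (cluster : List (Int × Int)),
      (∀ p, p ∈ visited ↔ p ∈ vis₀ ∨ p ∈ cluster) →
      cluster.Nodup →
      (∀ x ∈ cluster, pvReach grid seed x) →
      (∀ x ∈ cluster, ∀ y, pvInb grid y → pvVget grid y.1 y.2 = "Village" → pvAdj x y →
          y ∈ visited) →
      seed ∈ cluster →
      cluster.Nodup ∧ (∀ p, p ∈ cluster ↔ pvReach grid seed p) ∧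
        (∀ p, p ∈ visited ↔ p ∈ vis₀ ∨ p ∈ cluster) := by
    intro visited cluster hvis hnd hre hclo hseedin
    refine ⟨hnd, fun p => ⟨hre p, ?_⟩, hvis⟩
    intro hp
    refine pvReach_subset grid (· ∈ cluster) seed hseedin ?_ p hp
    intro x y hx hs
    have hy := (hclo x hx y hs.2.1 hs.2.2.2.1 hs.2.2.2.2)
    rcases (hvis y).1 hy with h0 | h
    · exfalso
      have hry : pvReach grid seed y :=
        Relation.ReflTransGen.tail (hre x hx) hs
      have : seed ∈ vis₀ :=
        pvReach_subset grid (· ∈ vis₀) y h0 hcl₀ seed (pvReach_symm _ _ _ hry)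
      exact hseed₀ this
    · exact h
  intro fuel
  induction fuel with
  | zero =>
      intro stack visited cluster hvis hnd hre hstack hclo hseedor hfuel
      have hsnil : stack = [] := by
        have := List.length_eq_zero_iff.1 (by omega : stack.length = 0)
        exact this
      subst hsnil
      have hseedin : seed ∈ cluster := by rcases hseedor with h | h; exact h; simp at h
      have hclo' : ∀ x ∈ cluster, ∀ y, pvInb grid y → pvVget grid y.1 y.2 = "Village" →
          pvAdj x y → y ∈ visited := by
        intro x hx y h1 h2 h3
        rcases hclo x hx y h1 h2 h3 with h | h
        · exact h
        · simp at h
      exact final visited cluster hvis hnd hre hclo' hseedin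
  | succ fuel ih =>
      intro stack visited cluster hvis hnd hre hstack hclo hseedor hfuel
      match stack with
      | [] =>
          have hseedin : seed ∈ cluster := by rcases hseedor with h | h; exact h; simp at h
          have hclo' : ∀ x ∈ cluster, ∀ y, pvInb grid y → pvVget grid y.1 y.2 = "Village" →
              pvAdj x y → y ∈ visited := by
            intro x hx y h1 h2 h3
            rcases hclo x hx y h1 h2 h3 with h | h
            · exact h
            · simp at h
          exact final visited cluster hvis hnd hre hclo' hseedin
      | (r, c) :: rest =>
          show _ ∧ _ ∧ _
          simp only [pvDfsLoop]
          by_cases hbr : (r, c) ∉ visited ∧ pvVget grid r c = "Village"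
          · rw [if_pos hbr]
            have hrcI : pvInb grid (r, c) := (hstack (r, c) List.mem_cons_self).1
            have hrcR : pvReach grid seed (r, c) := by
              rcases (hstack (r, c) List.mem_cons_self).2 with rfl | ⟨x, hx, hadj⟩
              · exact Relation.ReflTransGen.refl
              · have hxp := pvReach_props grid seed x hseedI hseedV (hre x hx)
                exact Relation.ReflTransGen.tail (hre x hx)
                  ⟨hxp.1, hrcI, hxp.2, hbr.2, hadj⟩
            apply ih (pvPush grid r c rest) (PySem.Set.add visited (r, c)) (cluster ++ [(r, c)])
            · intro p
              rw [PySem.Set.mem_add]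
              simp only [List.mem_append, List.mem_singleton]
              rw [hvis p]
              tauto
            · rw [List.nodup_append]
              refine ⟨hnd, List.nodup_singleton _, ?_⟩
              intro a ha b hbm
              rw [List.mem_singleton] at hbm
              subst hbm
              intro heq
              exact hbr.1 ((hvis (r, c)).2 (Or.inr (heq ▸ ha)))
            · intro x hx
              rcases List.mem_append.1 hx with h | h
              · exact hre x h
              · simp at h; subst h; exact hrcR
            · intro y hy
              rcases (mem_pvPush grid r c rest y).1 hy with ⟨h1, h2⟩ | h
              · exact ⟨h1, Or.inr ⟨(r, c), List.mem_append.2 (Or.inr (by simp)), h2⟩⟩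
              · have := hstack y (List.mem_cons_of_mem _ h)
                refine ⟨this.1, ?_⟩
                rcases this.2 with h' | ⟨x, hx, hadj⟩
                · exact Or.inl h'
                · exact Or.inr ⟨x, List.mem_append.2 (Or.inl hx), hadj⟩
            · intro x hx y h1 h2 h3
              rcases List.mem_append.1 hx with hxc | hxe
              · rcases hclo x hxc y h1 h2 h3 with h | h
                · exact Or.inl (by rw [PySem.Set.mem_add]; exact Or.inl h)
                · rcases List.mem_cons.1 h with rfl | h'
                  · exact Or.inl (by rw [PySem.Set.mem_add]; exact Or.inr rfl)
                  · exact Or.inr ((mem_pvPush grid r c rest y).2 (Or.inr h'))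
              · simp at hxe; subst hxe
                exact Or.inr ((mem_pvPush grid r c rest y).2 (Or.inl ⟨h1, h3⟩))
            · rcases hseedor with h | h
              · exact Or.inl (List.mem_append.2 (Or.inl h))
              · rcases List.mem_cons.1 h with rfl | h'
                · exact Or.inl (List.mem_append.2 (Or.inr (by simp)))
                · exact Or.inr ((mem_pvPush grid r c rest seed).2 (Or.inr h'))
            · have hu : pvU grid (PySem.Set.add visited (r, c)) < pvU grid visited := by
                refine pvU_lt grid visited _ (r, c) ?_ hrcI hbr.1 ?_
                · intro q hq; rw [PySem.Set.mem_add]; exact Or.inl hq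
                · rw [PySem.Set.mem_add]; exact Or.inr rfl
              have hl := length_pvPush grid r c rest
              simp only [List.length_cons] at hfuel
              omega
          · rw [if_neg hbr]
            apply ih rest visited cluster hvis hnd hre
            · intro y hy; exact hstack y (List.mem_cons_of_mem _ hy)
            · intro x hx y h1 h2 h3
              rcases hclo x hx y h1 h2 h3 with h | h
              · exact Or.inl h
              · rcases List.mem_cons.1 h with rfl | h'
                · left
                  by_contra hyv
                  exact hbr ⟨hyv, h2⟩
                · exact Or.inr h'
            · rcases hseedor with h | h
              · exact Or.inl h
              · rcases List.mem_cons.1 h with rfl | h'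
                · left
                  have hv : (r, c) ∈ visited := by
                    by_contra hyv
                    exact hbr ⟨hyv, hseedV⟩
                  rcases (hvis (r, c)).1 hv with h0 | hc
                  · exact absurd h0 hseed₀
                  · exact hc
                · exact Or.inr h'
            · simp only [List.length_cons] at hfuel
              omega

theorem length_pvCellList (grid : List (List String)) :
    (pvCellList grid).length = grid.length * (PySem.List.pyGetD grid 0 []).length := by
  unfold pvCellList
  rw [List.length_flatMap]
  have h : ∀ r ∈ PySem.List.pyRange 0 (grid.length : Int) 1,
      ((PySem.List.pyRange 0 ((PySem.List.pyGetD grid 0 []).length : Int) 1).map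
        (fun c => (r, c))).length = (PySem.List.pyGetD grid 0 []).length := by
    intro r _
    simp [PySem.List.length_pyRange_one]
  rw [List.map_congr_left h, List.map_const']
  simp [List.sum_replicate, PySem.List.length_pyRange_one, smul_eq_mul]

theorem pvDfs_spec (grid : List (List String)) (visited : PySem.Set (Int × Int)) (r c : Int)
    (hI : pvInb grid (r, c)) (hV : pvVget grid r c = "Village") (h₀ : (r, c) ∉ visited)
    (hcl : ∀ x y, x ∈ visited → pvStep grid x y → y ∈ visited) :
    (pvDfs grid r c visited "Village").1.Nodup ∧
    (∀ p, p ∈ (pvDfs grid r c visited "Village").1 ↔ pvReach grid (r, c) p) ∧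
    (∀ p, p ∈ (pvDfs grid r c visited "Village").2 ↔
        p ∈ visited ∨ p ∈ (pvDfs grid r c visited "Village").1) := by
  have hres := pvDfsLoop_spec grid visited (r, c) hI hV h₀ hcl
    (5 * (grid.length * (PySem.List.pyGetD grid 0 []).length) + 1) [(r, c)] visited []
    (by simp) (by simp) (by simp)
    (by intro y hy; rw [List.mem_singleton] at hy; subst hy; exact ⟨hI, Or.inl rfl⟩)
    (by simp)
    (Or.inr List.mem_cons_self)
    (by
      have h1 : pvU grid visited ≤ (pvCellList grid).length := List.length_filter_le _ _
      rw [length_pvCellList] at h1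
      simp only [List.length_cons, List.length_nil]
      omega)
  exact hres

-- B-side: characterization of one conditional add of pvGrow's inner fold
def pvGrowF (grid : List (List String)) (H W : Int)
    (cn : PySem.Set (Int × Int) × List (Int × Int)) (q : Int × Int) :
    PySem.Set (Int × Int) × List (Int × Int) :=
  if 0 ≤ q.1 ∧ q.1 < H ∧ 0 ≤ q.2 ∧ q.2 < W ∧ q ∉ cn.1 ∧ pvVget grid q.1 q.2 = "Village"
  then (PySem.Set.add cn.1 q, cn.2 ++ [q]) else cn

theorem pvGrow_eq (grid : List (List String)) (H W : Int)
    (cn : PySem.Set (Int × Int) × List (Int × Int)) (p : Int × Int) :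
    pvGrow grid H W cn p = (pvNbrs p.1 p.2).foldl (pvGrowF grid H W) cn := rfl

theorem mem_pvNbrs (x y : Int) (q : Int × Int) : q ∈ pvNbrs x y ↔ pvAdj (x, y) q := by
  rcases q with ⟨a, b⟩
  unfold pvNbrs pvAdj
  simp [Prod.ext_iff]

theorem pvGrowAux (grid : List (List String)) (L : List (Int × Int)) :
    ∀ cn : PySem.Set (Int × Int) × List (Int × Int),
      ∃ t : List (Int × Int),
        (L.foldl (pvGrowF grid (grid.length : Int) ((PySem.List.pyGetD grid 0 []).length : Int)) cn).2 = cn.2 ++ t ∧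
        (∀ p, p ∈ (L.foldl (pvGrowF grid (grid.length : Int) ((PySem.List.pyGetD grid 0 []).length : Int)) cn).1 ↔
            p ∈ cn.1 ∨ p ∈ t) ∧
        (∀ p ∈ t, p ∉ cn.1 ∧ p ∈ L ∧ pvInb grid p ∧ pvVget grid p.1 p.2 = "Village") ∧
        (∀ q ∈ L, pvInb grid q → pvVget grid q.1 q.2 = "Village" →
            q ∈ (L.foldl (pvGrowF grid (grid.length : Int) ((PySem.List.pyGetD grid 0 []).length : Int)) cn).1) ∧
        (cn.1.Nodup →
            (L.foldl (pvGrowF grid (grid.length : Int) ((PySem.List.pyGetD grid 0 []).length : Int)) cn).1.Nodup) := by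
  induction L with
  | nil =>
      intro cn
      refine ⟨[], by simp, by simp, by simp, by simp, ?_⟩
      simp only [List.foldl_nil]
      exact fun h => h
  | cons q L ih =>
      intro cn
      simp only [List.foldl_cons]
      by_cases hc : 0 ≤ q.1 ∧ q.1 < (grid.length : Int) ∧ 0 ≤ q.2 ∧
          q.2 < ((PySem.List.pyGetD grid 0 []).length : Int) ∧ q ∉ cn.1 ∧
          pvVget grid q.1 q.2 = "Village"
      · have hstep : pvGrowF grid (grid.length : Int) ((PySem.List.pyGetD grid 0 []).length : Int) cn q =
            (PySem.Set.add cn.1 q, cn.2 ++ [q]) := by unfold pvGrowF; rw [if_pos hc]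
        rw [hstep]
        obtain ⟨t, h2, hiff, htp, hcov, hnd⟩ := ih (PySem.Set.add cn.1 q, cn.2 ++ [q])
        refine ⟨q :: t, ?_, ?_, ?_, ?_, ?_⟩
        · rw [h2]; simp
        · intro p
          rw [hiff p]
          simp only [PySem.Set.mem_add, List.mem_cons]
          tauto
        · intro p hp
          rcases List.mem_cons.1 hp with rfl | hp'
          · exact ⟨hc.2.2.2.2.1, List.mem_cons_self, ⟨hc.1, hc.2.1, hc.2.2.1, hc.2.2.2.1⟩,
              hc.2.2.2.2.2⟩
          · obtain ⟨ha, hb, hic, hd⟩ := htp p hp'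
            refine ⟨?_, List.mem_cons_of_mem _ hb, hic, hd⟩
            intro hmem
            exact ha (by rw [PySem.Set.mem_add]; exact Or.inl hmem)
        · intro q' hq' hI hV
          rcases List.mem_cons.1 hq' with rfl | hq''
          · exact (hiff q').2 (Or.inl (by rw [PySem.Set.mem_add]; exact Or.inr rfl))
          · exact hcov q' hq'' hI hV
        · intro hn
          exact hnd (PySem.Set.nodup_add _ _ hn)
      · have hstep : pvGrowF grid (grid.length : Int) ((PySem.List.pyGetD grid 0 []).length : Int) cn q = cn := by
          unfold pvGrowF; rw [if_neg hc]
        rw [hstep]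
        obtain ⟨t, h2, hiff, htp, hcov, hnd⟩ := ih cn
        refine ⟨t, h2, hiff, ?_, ?_, hnd⟩
        · intro p hp
          obtain ⟨ha, hb, hic, hd⟩ := htp p hp
          exact ⟨ha, List.mem_cons_of_mem _ hb, hic, hd⟩
        · intro q' hq' hI hV
          rcases List.mem_cons.1 hq' with rfl | hq''
          · have hin : q' ∈ cn.1 := by
              by_contra hq0
              exact hc ⟨hI.1, hI.2.1, hI.2.2.1, hI.2.2.2, hq0, hV⟩
            exact (hiff q').2 (Or.inl hin)
          · exact hcov q' hq'' hI hV

-- pvGrow on one frontier cell p (in range, Village)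
theorem pvGrow_spec (grid : List (List String)) (p : Int × Int)
    (hpI : pvInb grid p) (hpV : pvVget grid p.1 p.2 = "Village")
    (cn : PySem.Set (Int × Int) × List (Int × Int)) :
    ∃ t : List (Int × Int),
      (pvGrow grid (grid.length : Int) ((PySem.List.pyGetD grid 0 []).length : Int) cn p).2 = cn.2 ++ t ∧
      (∀ q, q ∈ (pvGrow grid (grid.length : Int) ((PySem.List.pyGetD grid 0 []).length : Int) cn p).1 ↔
          q ∈ cn.1 ∨ q ∈ t) ∧
      (∀ q ∈ t, q ∉ cn.1 ∧ pvStep grid p q) ∧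
      (∀ q, pvStep grid p q →
          q ∈ (pvGrow grid (grid.length : Int) ((PySem.List.pyGetD grid 0 []).length : Int) cn p).1) ∧
      (cn.1.Nodup →
          (pvGrow grid (grid.length : Int) ((PySem.List.pyGetD grid 0 []).length : Int) cn p).1.Nodup) := by
  rw [pvGrow_eq]
  obtain ⟨t, h2, hiff, htp, hcov, hnd⟩ := pvGrowAux grid (pvNbrs p.1 p.2) cn
  refine ⟨t, h2, hiff, ?_, ?_, hnd⟩
  · intro q hq
    obtain ⟨ha, hb, hic, hd⟩ := htp q hq
    have hadj : pvAdj p q := by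
      have := (mem_pvNbrs p.1 p.2 q).1 hb
      exact this
    exact ⟨ha, hpI, hic, hpV, hd, hadj⟩
  · intro q hs
    exact hcov q ((mem_pvNbrs p.1 p.2 q).2 hs.2.2.2.2) hs.2.1 hs.2.2.2.1

-- one BFS round: fold pvGrow over the whole frontier
theorem pvRound_spec (grid : List (List String)) (fr : List (Int × Int)) :
    ∀ cn : PySem.Set (Int × Int) × List (Int × Int),
      (∀ p ∈ fr, pvInb grid p ∧ pvVget grid p.1 p.2 = "Village") →
      ∃ t : List (Int × Int),
        (fr.foldl (pvGrow grid (grid.length : Int) ((PySem.List.pyGetD grid 0 []).length : Int)) cn).2 = cn.2 ++ t ∧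
        (∀ q, q ∈ (fr.foldl (pvGrow grid (grid.length : Int) ((PySem.List.pyGetD grid 0 []).length : Int)) cn).1 ↔
            q ∈ cn.1 ∨ q ∈ t) ∧
        (∀ q ∈ t, q ∉ cn.1 ∧ ∃ x ∈ fr, pvStep grid x q) ∧
        (∀ x ∈ fr, ∀ q, pvStep grid x q →
            q ∈ (fr.foldl (pvGrow grid (grid.length : Int) ((PySem.List.pyGetD grid 0 []).length : Int)) cn).1) ∧
        (cn.1.Nodup →
            (fr.foldl (pvGrow grid (grid.length : Int) ((PySem.List.pyGetD grid 0 []).length : Int)) cn).1.Nodup) := by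
  induction fr with
  | nil =>
      intro cn _
      refine ⟨[], by simp, by simp, by simp, by simp, ?_⟩
      simp only [List.foldl_nil]
      exact fun h => h
  | cons x fr ih =>
      intro cn hfr
      simp only [List.foldl_cons]
      obtain ⟨t₁, h2₁, hiff₁, htp₁, hcov₁, hnd₁⟩ :=
        pvGrow_spec grid x (hfr x List.mem_cons_self).1 (hfr x List.mem_cons_self).2 cn
      obtain ⟨t₂, h2₂, hiff₂, htp₂, hcov₂, hnd₂⟩ :=
        ih (pvGrow grid (grid.length : Int) ((PySem.List.pyGetD grid 0 []).length : Int) cn x)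
          (fun p hp => hfr p (List.mem_cons_of_mem _ hp))
      refine ⟨t₁ ++ t₂, ?_, ?_, ?_, ?_, ?_⟩
      · rw [h2₂, h2₁, List.append_assoc]
      · intro q
        rw [hiff₂ q, hiff₁ q, List.mem_append]
        tauto
      · intro q hq
        rcases List.mem_append.1 hq with h | h
        · obtain ⟨ha, hs⟩ := htp₁ q h
          exact ⟨ha, x, List.mem_cons_self, hs⟩
        · obtain ⟨ha, x', hx', hs⟩ := htp₂ q h
          refine ⟨?_, x', List.mem_cons_of_mem _ hx', hs⟩
          intro hmem
          exact ha ((hiff₁ q).2 (Or.inl hmem))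
      · intro x' hx' q hs
        rcases List.mem_cons.1 hx' with rfl | hx''
        · exact (hiff₂ q).2 (Or.inl (hcov₁ q hs))
        · exact hcov₂ x' hx'' q hs
      · intro hn
        exact hnd₂ (hnd₁ hn)

theorem pvBfs_nil (grid : List (List String)) (H W : Int) (fuel : Nat)
    (comp : PySem.Set (Int × Int)) : pvBfs grid H W fuel [] comp = comp := by
  cases fuel <;> rfl

theorem pvBfsLoop_spec (grid : List (List String)) (seed : Int × Int)
    (hI : pvInb grid seed) (hV : pvVget grid seed.1 seed.2 = "Village") :
    ∀ (fuel : Nat) (frontier : List (Int × Int)) (comp : PySem.Set (Int × Int)),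
      (∀ p ∈ frontier, p ∈ comp) →
      (∀ p ∈ comp, pvReach grid seed p) →
      seed ∈ comp → comp.Nodup →
      (∀ x, x ∈ comp → x ∉ frontier → ∀ y, pvStep grid x y → y ∈ comp) →
      pvU grid comp + 1 ≤ fuel →
      (pvBfs grid (grid.length : Int) ((PySem.List.pyGetD grid 0 []).length : Int) fuel frontier comp).Nodup ∧
      (∀ p, p ∈ pvBfs grid (grid.length : Int) ((PySem.List.pyGetD grid 0 []).length : Int) fuel frontier comp ↔
          pvReach grid seed p) := by
  have final : ∀ comp : PySem.Set (Int × Int),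
      (∀ p ∈ comp, pvReach grid seed p) → seed ∈ comp → comp.Nodup →
      (∀ x ∈ comp, ∀ y, pvStep grid x y → y ∈ comp) →
      comp.Nodup ∧ (∀ p, p ∈ comp ↔ pvReach grid seed p) := by
    intro comp hre hseedin hnd hclo
    exact ⟨hnd, fun p => ⟨hre p, fun hp =>
      pvReach_subset grid (· ∈ comp) seed hseedin (fun x y hx hs => hclo x hx y hs) p hp⟩⟩
  intro fuel
  induction fuel with
  | zero =>
      intro frontier comp _ _ _ _ _ hfuel
      omega
  | succ fuel ih =>
      intro frontier comp hsub hre hseedin hnd hclo hfuel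
      match frontier with
      | [] =>
          rw [pvBfs_nil]
          exact final comp hre hseedin hnd (fun x hx => hclo x hx (by simp))
      | q :: fr =>
          have hfrp : ∀ p ∈ q :: fr, pvInb grid p ∧ pvVget grid p.1 p.2 = "Village" :=
            fun p hp => pvReach_props grid seed p hI hV (hre p (hsub p hp))
          obtain ⟨t, h2, hiff, htp, hcov, hndp⟩ := pvRound_spec grid (q :: fr) (comp, []) hfrp
          have h2' : ((q :: fr).foldl (pvGrow grid (grid.length : Int)
              ((PySem.List.pyGetD grid 0 []).length : Int)) (comp, [])).2 = t := by
            rw [h2]; simp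
          show (pvBfs _ _ _ (fuel + 1) (q :: fr) comp).Nodup ∧ _
          have hred : pvBfs grid (grid.length : Int) ((PySem.List.pyGetD grid 0 []).length : Int)
              (fuel + 1) (q :: fr) comp =
              pvBfs grid (grid.length : Int) ((PySem.List.pyGetD grid 0 []).length : Int) fuel
                ((q :: fr).foldl (pvGrow grid (grid.length : Int)
                  ((PySem.List.pyGetD grid 0 []).length : Int)) (comp, [])).2
                ((q :: fr).foldl (pvGrow grid (grid.length : Int)
                  ((PySem.List.pyGetD grid 0 []).length : Int)) (comp, [])).1 := rfl
          rw [hred, h2']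
          set cc := ((q :: fr).foldl (pvGrow grid (grid.length : Int)
              ((PySem.List.pyGetD grid 0 []).length : Int)) (comp, [])).1 with hcc
          have hccre : ∀ p ∈ cc, pvReach grid seed p := by
            intro p hp
            rcases (hiff p).1 hp with h | h
            · exact hre p h
            · obtain ⟨_, x, hx, hs⟩ := htp p h
              exact Relation.ReflTransGen.tail (hre x (hsub x hx)) hs
          have hccclo : ∀ x, x ∈ cc → x ∉ t → ∀ y, pvStep grid x y → y ∈ cc := by
            intro x hx hxt y hs
            rcases (hiff x).1 hx with hxc | hxt'
            · by_cases hxfr : x ∈ q :: fr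
              · exact hcov x hxfr y hs
              · exact (hiff y).2 (Or.inl (hclo x hxc hxfr y hs))
            · exact absurd hxt' hxt
          have hccnd : cc.Nodup := hndp hnd
          have hccseed : seed ∈ cc := (hiff seed).2 (Or.inl hseedin)
          rcases List.eq_nil_or_concat' t with rfl | ⟨t', w, rfl⟩
          · rw [pvBfs_nil]
            exact final cc hccre hccseed hccnd (fun x hx => hccclo x hx (by simp))
          · have hw : w ∈ t' ++ [w] := List.mem_append.2 (Or.inr (by simp))
            obtain ⟨hwnc, x, hx, hs⟩ := htp w hw
            have hu : pvU grid cc < pvU grid comp := by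
              refine pvU_lt grid comp cc w (fun a ha => (hiff a).2 (Or.inl ha)) hs.2.1 hwnc
                ((hiff w).2 (Or.inr hw))
            exact ih (t' ++ [w]) cc (fun p hp => (hiff p).2 (Or.inr hp)) hccre hccseed hccnd
              hccclo (by omega)

theorem pvBfs_spec (grid : List (List String)) (r c : Int)
    (hI : pvInb grid (r, c)) (hV : pvVget grid r c = "Village") :
    (pvBfs grid (grid.length : Int) ((PySem.List.pyGetD grid 0 []).length : Int)
        (grid.length * (PySem.List.pyGetD grid 0 []).length + 1) [(r, c)]
        (PySem.Set.ofList [(r, c)])).Nodup ∧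
    (∀ p, p ∈ pvBfs grid (grid.length : Int) ((PySem.List.pyGetD grid 0 []).length : Int)
        (grid.length * (PySem.List.pyGetD grid 0 []).length + 1) [(r, c)]
        (PySem.Set.ofList [(r, c)]) ↔ pvReach grid (r, c) p) := by
  apply pvBfsLoop_spec grid (r, c) hI hV
  · intro p hp; rw [List.mem_singleton] at hp; subst hp; simp [PySem.Set.mem_ofList]
  · intro p hp
    rw [PySem.Set.mem_ofList, List.mem_singleton] at hp
    subst hp
    exact Relation.ReflTransGen.refl
  · simp [PySem.Set.mem_ofList]
  · exact PySem.Set.nodup_ofList _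
  · intro x hx hxf
    rw [PySem.Set.mem_ofList, List.mem_singleton] at hx
    subst hx
    exact absurd List.mem_cons_self hxf
  · have h1 : pvU grid (PySem.Set.ofList [(r, c)]) ≤ (pvCellList grid).length :=
      List.length_filter_le _ _
    rw [length_pvCellList] at h1
    omega

-- running top-two accumulator (B's final aggregation) vs sort-then-index (A's)
def pvUpd (p : Int × Int) (x : Int) : Int × Int :=
  if x > p.1 then (x, p.1) else if x > p.2 then (p.1, x) else p

def pvIns (x : Int) : List Int → List Int
  | [] => [x]
  | a :: t => if a < x then x :: a :: t else a :: pvIns x t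

def pvIdesc (l : List Int) : List Int := l.foldr pvIns []

def pvFT : List Int → Int × Int
  | [] => (0, 0)
  | [a] => (a, 0)
  | a :: b :: _ => (a, b)

theorem pvIns_perm (x : Int) (t : List Int) : (pvIns x t).Perm (x :: t) := by
  induction t with
  | nil => simp [pvIns]
  | cons a t ih =>
      unfold pvIns
      split_ifs
      · exact List.Perm.refl _
      · exact ((ih.cons a).trans (List.Perm.swap x a t))

theorem pvIns_sorted (x : Int) (t : List Int) (h : t.Pairwise (· ≥ ·)) :
    (pvIns x t).Pairwise (· ≥ ·) := by
  induction t with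
  | nil => simp [pvIns]
  | cons a t ih =>
      rw [List.pairwise_cons] at h
      unfold pvIns
      split_ifs with hc
      · refine List.Pairwise.cons ?_ (List.Pairwise.cons h.1 h.2)
        intro y hy
        rcases List.mem_cons.1 hy with rfl | hy'
        · omega
        · have := h.1 y hy'
          omega
      · refine List.Pairwise.cons ?_ (ih h.2)
        intro y hy
        rcases List.mem_cons.1 ((pvIns_perm x t).mem_iff.1 hy) with rfl | h'
        · omega
        · exact h.1 y h'

theorem pvIdesc_perm (l : List Int) : (pvIdesc l).Perm l := by
  induction l with
  | nil => simp [pvIdesc]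
  | cons a l ih =>
      unfold pvIdesc at *
      simp only [List.foldr_cons]
      exact (pvIns_perm a _).trans (ih.cons a)

theorem pvIdesc_sorted (l : List Int) : (pvIdesc l).Pairwise (· ≥ ·) := by
  induction l with
  | nil => simp [pvIdesc]
  | cons a l ih =>
      unfold pvIdesc at *
      simp only [List.foldr_cons]
      exact pvIns_sorted a _ ih

theorem pvFT_props (t : List Int) (hs : t.Pairwise (· ≥ ·)) (hn : ∀ y ∈ t, 0 ≤ y) :
    0 ≤ (pvFT t).2 ∧ (pvFT t).2 ≤ (pvFT t).1 := by
  match t with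
  | [] => simp [pvFT]
  | [a] => simp [pvFT]; exact hn a (by simp)
  | a :: b :: t =>
      rw [List.pairwise_cons] at hs
      exact ⟨hn b (by simp), by simpa [pvFT] using hs.1 b (by simp)⟩

theorem pvFT_ins (x : Int) (t : List Int) (hs : t.Pairwise (· ≥ ·))
    (hx : 0 ≤ x) (hn : ∀ y ∈ t, 0 ≤ y) :
    pvFT (pvIns x t) = pvUpd (pvFT t) x := by
  match t with
  | [] => simp [pvIns, pvFT, pvUpd]; split_ifs <;> simp [Prod.ext_iff] <;> omega
  | [a] =>
      simp only [pvIns, pvFT, pvUpd]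
      have ha := hn a (by simp)
      split_ifs <;> simp_all [pvFT, Prod.ext_iff] <;> omega
  | a :: b :: t =>
      rw [List.pairwise_cons] at hs
      have hab : b ≤ a := hs.1 b (by simp)
      simp only [pvIns, pvFT, pvUpd]
      split_ifs with h1 h2 h3 h4 h5 h6 h7 <;> simp_all [pvFT, Prod.ext_iff] <;> omega

theorem pvFT_idesc_cons (x : Int) (l : List Int) (hx : 0 ≤ x) (hn : ∀ y ∈ l, 0 ≤ y) :
    pvFT (pvIdesc (x :: l)) = pvUpd (pvFT (pvIdesc l)) x := by
  have : pvIdesc (x :: l) = pvIns x (pvIdesc l) := by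
    unfold pvIdesc; simp [List.foldr_cons]
  rw [this]
  exact pvFT_ins x _ (pvIdesc_sorted l) hx
    (fun y hy => hn y ((pvIdesc_perm l).subset hy))

set_option maxHeartbeats 1600000 in
theorem pvUpd_comm3 (P : Int × Int) (b s x : Int)
    (hP1 : 0 ≤ P.2) (hP2 : P.2 ≤ P.1) (hs : 0 ≤ s) (hsb : s ≤ b) (hx : 0 ≤ x) :
    pvUpd (pvUpd P (pvUpd (b, s) x).2) (pvUpd (b, s) x).1 =
      pvUpd (pvUpd (pvUpd P x) s) b := by
  rcases P with ⟨p1, p2⟩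
  by_cases hA : x > b
  · have e : pvUpd (b, s) x = (x, b) := by simp [pvUpd, hA]
    rw [e]
    simp only [pvUpd]
    split_ifs <;> (refine Prod.ext ?_ ?_ <;> dsimp <;> omega)
  · by_cases hB : x > s
    · have e : pvUpd (b, s) x = (b, x) := by simp [pvUpd, hA, hB]
      rw [e]
      simp only [pvUpd]
      split_ifs <;> (refine Prod.ext ?_ ?_ <;> dsimp <;> omega)
    · have e : pvUpd (b, s) x = (b, s) := by simp [pvUpd, hA, hB]
      rw [e]
      simp only [pvUpd]
      split_ifs <;> (refine Prod.ext ?_ ?_ <;> dsimp <;> omega)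

theorem pvUpd_props (b s x : Int) (hs : 0 ≤ s) (hsb : s ≤ b) (hx : 0 ≤ x) :
    0 ≤ (pvUpd (b, s) x).2 ∧ (pvUpd (b, s) x).2 ≤ (pvUpd (b, s) x).1 := by
  simp only [pvUpd]
  split_ifs <;> simp_all <;> omega

theorem pvFoldUpd (l : List Int) : ∀ b s : Int, 0 ≤ s → s ≤ b → (∀ x ∈ l, 0 ≤ x) →
    l.foldl pvUpd (b, s) = pvFT (pvIdesc (b :: s :: l)) := by
  induction l with
  | nil =>
      intro b s h1 h2 _
      simp only [List.foldl_nil, pvIdesc, List.foldr_cons, List.foldr_nil]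
      by_cases hc : s < b
      · simp [pvIns, pvFT, hc]
      · have hsb : s = b := by omega
        subst hsb
        simp [pvIns, pvFT]
  | cons x l ih =>
      intro b s h1 h2 hn
      have hx : 0 ≤ x := hn x (by simp)
      have hln : ∀ y ∈ l, 0 ≤ y := fun y hy => hn y (List.mem_cons_of_mem _ hy)
      have hup := pvUpd_props b s x h1 h2 hx
      simp only [List.foldl_cons]
      have : pvUpd (b, s) x = ((pvUpd (b, s) x).1, (pvUpd (b, s) x).2) := rfl
      rw [this, ih _ _ hup.1 hup.2 hln]
      have hP := pvFT_props (pvIdesc l) (pvIdesc_sorted l)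
        (fun y hy => hln y ((pvIdesc_perm l).subset hy))
      have e1 : pvFT (pvIdesc ((pvUpd (b, s) x).1 :: (pvUpd (b, s) x).2 :: l)) =
          pvUpd (pvUpd (pvFT (pvIdesc l)) (pvUpd (b, s) x).2) (pvUpd (b, s) x).1 := by
        rw [pvFT_idesc_cons ((pvUpd (b, s) x).1) ((pvUpd (b, s) x).2 :: l)
              (le_trans hup.1 hup.2)
              (by intro y hy; rcases List.mem_cons.1 hy with rfl | hy'
                  · exact hup.1
                  · exact hln y hy'),
            pvFT_idesc_cons ((pvUpd (b, s) x).2) l hup.1 hln]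
      have e2 : pvFT (pvIdesc (b :: s :: x :: l)) =
          pvUpd (pvUpd (pvUpd (pvFT (pvIdesc l)) x) s) b := by
        rw [pvFT_idesc_cons b (s :: x :: l) (le_trans h1 h2)
              (by intro y hy; rcases List.mem_cons.1 hy with rfl | hy'
                  · exact h1
                  · rcases List.mem_cons.1 hy' with rfl | hy''
                    · exact hx
                    · exact hln y hy''),
            pvFT_idesc_cons s (x :: l) h1
              (by intro y hy; rcases List.mem_cons.1 hy with rfl | hy'
                  · exact hx
                  · exact hln y hy'),
            pvFT_idesc_cons x l hx hln]
      rw [e1, e2]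
      exact pvUpd_comm3 (pvFT (pvIdesc l)) b s x hP.1 hP.2 h1 h2 hx

theorem pvIns_zero (t : List Int) (hn : ∀ y ∈ t, 0 ≤ y) : pvIns 0 t = t ++ [0] := by
  induction t with
  | nil => rfl
  | cons a t ih =>
      have ha : 0 ≤ a := hn a (by simp)
      unfold pvIns
      rw [if_neg (by omega)]
      rw [ih (fun y hy => hn y (List.mem_cons_of_mem _ hy))]
      simp

theorem pvFinal (clusters : List (List (Int × Int))) :
    (if 2 ≤ (PySem.List.sorted clusters (fun cl => (cl.length : Int)) true).length
     then ((PySem.List.pyGetD (PySem.List.sorted clusters (fun cl => (cl.length : Int)) true) 1 []).length : Int) * 2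
     else 0) =
    ((clusters.map (fun cl => (cl.length : Int))).foldl pvUpd (0, 0)).2 * 2 := by
  haveI : Std.Antisymm (fun a b : Int => a ≥ b) := ⟨fun a b h1 h2 => le_antisymm h2 h1⟩
  have hnn : ∀ x ∈ clusters.map (fun cl => (cl.length : Int)), 0 ≤ x := by
    intro x hx
    obtain ⟨cl, _, rfl⟩ := List.mem_map.1 hx
    positivity
  have hmap : (PySem.List.sorted clusters (fun cl => (cl.length : Int)) true).map
      (fun cl => (cl.length : Int)) = pvIdesc (clusters.map (fun cl => (cl.length : Int))) := by
    refine List.Perm.eq_of_pairwise' (r := fun a b : Int => a ≥ b) ?_ ?_ ?_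
    · show ((PySem.List.sorted clusters (fun cl => (cl.length : Int)) true).map
        (fun cl => (cl.length : Int))).Pairwise (· ≥ ·)
      exact List.pairwise_map.mpr (PySem.List.sorted_pairwise_rev clusters _)
    · exact pvIdesc_sorted _
    · exact ((PySem.List.sorted_perm clusters (fun cl => (cl.length : Int)) true).map
        (fun cl => (cl.length : Int))).trans (pvIdesc_perm _).symm
  have hfold := pvFoldUpd (clusters.map (fun cl => (cl.length : Int))) 0 0 le_rfl le_rfl hnn
  have hidesc : pvIdesc ((0 : Int) :: 0 :: clusters.map (fun cl => (cl.length : Int))) =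
      pvIdesc (clusters.map (fun cl => (cl.length : Int))) ++ [0, 0] := by
    show pvIns 0 (pvIns 0 (pvIdesc _)) = _
    have hn1 : ∀ y ∈ pvIdesc (clusters.map (fun cl => (cl.length : Int))), 0 ≤ y :=
      fun y hy => hnn y ((pvIdesc_perm _).subset hy)
    rw [pvIns_zero _ hn1, pvIns_zero]
    · simp
    · intro y hy
      rcases List.mem_append.1 hy with h | h
      · exact hn1 y h
      · rw [List.mem_singleton] at h; omega
  rw [hfold, hidesc]
  have hlen : (PySem.List.sorted clusters (fun cl => (cl.length : Int)) true).length =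
      (pvIdesc (clusters.map (fun cl => (cl.length : Int)))).length := by
    rw [(PySem.List.sorted_perm clusters _ true).length_eq,
      (pvIdesc_perm _).length_eq, List.length_map]
  match hd : pvIdesc (clusters.map (fun cl => (cl.length : Int))) with
  | [] =>
      rw [hd] at hlen
      simp only [List.length_nil] at hlen
      rw [hd, if_neg (by omega)]
      simp [pvFT]
  | [a] =>
      rw [hd] at hlen
      simp only [List.length_cons, List.length_nil] at hlen
      rw [hd, if_neg (by omega)]
      simp [pvFT]
  | a :: b :: t =>
      rw [hd] at hlen hmap
      simp only [List.length_cons] at hlen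
      have h2le : 2 ≤ (PySem.List.sorted clusters (fun cl => (cl.length : Int)) true).length := by
        omega
      have h1lt : 1 < (PySem.List.sorted clusters (fun cl => (cl.length : Int)) true).length := by
        omega
      rw [hd, if_pos h2le]
      have hget : PySem.List.pyGetD
          (PySem.List.sorted clusters (fun cl => (cl.length : Int)) true) 1 [] =
          (PySem.List.sorted clusters (fun cl => (cl.length : Int)) true)[1] := by
        have := PySem.List.pyGetD_eq_getElem
          (xs := PySem.List.sorted clusters (fun cl => (cl.length : Int)) true)
          (i := 1) (d := []) (by omega) (by exact_mod_cast h1lt)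
        simpa using this
      rw [hget]
      have hb : ((PySem.List.sorted clusters (fun cl => (cl.length : Int)) true)[1].length : Int)
          = b := by
        have h := congrArg (fun l => l[1]?) hmap
        simp only [List.getElem?_map] at h
        rw [List.getElem?_eq_getElem h1lt] at h
        simp at h
        exact h
      rw [hb]
      simp [pvFT]

-- the per-cell bodies of the two outer double loops
def pvGA (grid : List (List String))
    (st : PySem.Set (Int × Int) × List (List (Int × Int))) (p : Int × Int) :
    PySem.Set (Int × Int) × List (List (Int × Int)) :=
  if p ∉ st.1 ∧ pvVget grid p.1 p.2 = "Village" then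
    let q := pvDfs grid p.1 p.2 st.1 "Village"
    (q.2, st.2 ++ [q.1])
  else st

def pvGB (grid : List (List String))
    (st : PySem.Set (Int × Int) × Int × Int) (p : Int × Int) :
    PySem.Set (Int × Int) × Int × Int :=
  if pvVget grid p.1 p.2 = "Village" ∧ p ∉ st.1 then
    let comp := pvBfs grid (grid.length : Int) ((PySem.List.pyGetD grid 0 []).length : Int)
      (grid.length * (PySem.List.pyGetD grid 0 []).length + 1) [p] (PySem.Set.ofList [p])
    let seen := PySem.Set.union st.1 comp
    let s : Int := PySem.Set.len comp
    if s > st.2.1 then (seen, s, st.2.1)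
    else if s > st.2.2 then (seen, st.2.1, s)
    else (seen, st.2.1, st.2.2)
  else st

def pvInv (grid : List (List String))
    (stA : PySem.Set (Int × Int) × List (List (Int × Int)))
    (stB : PySem.Set (Int × Int) × Int × Int) : Prop :=
  (∀ p, p ∈ stA.1 ↔ p ∈ stB.1) ∧
  (∀ x y, x ∈ stA.1 → pvStep grid x y → y ∈ stA.1) ∧
  stB.2 = (stA.2.map (fun cl => (cl.length : Int))).foldl pvUpd (0, 0)

theorem pvFoldNested {α β γ : Type} (rows : List α) (cols : List β) (g : γ → α × β → γ) :
    ∀ init : γ,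
      rows.foldl (fun st r => cols.foldl (fun st c => g st (r, c)) st) init =
      (rows.flatMap (fun r => cols.map (fun c => (r, c)))).foldl g init := by
  induction rows with
  | nil => intro init; rfl
  | cons r rows ih =>
      intro init
      simp only [List.foldl_cons, List.flatMap_cons, List.foldl_append, List.foldl_map]
      exact ih _

theorem pvSetLen_eq {α : Type} (s : PySem.Set α) : PySem.Set.len s = (s.length : Int) := rfl

theorem pvMain (grid : List (List String)) :
    ∀ L : List (Int × Int), (∀ p ∈ L, pvInb grid p) →
      ∀ stA stB, pvInv grid stA stB →
        pvInv grid (L.foldl (pvGA grid) stA) (L.foldl (pvGB grid) stB) := by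
  intro L
  induction L with
  | nil => intro _ stA stB h; exact h
  | cons p L ih =>
      intro hL stA stB hinv
      obtain ⟨hmem, hclosed, htt⟩ := hinv
      have hpI : pvInb grid p := hL p List.mem_cons_self
      have hL' : ∀ q ∈ L, pvInb grid q := fun q hq => hL q (List.mem_cons_of_mem _ hq)
      simp only [List.foldl_cons]
      by_cases hv : pvVget grid p.1 p.2 = "Village"
      · by_cases hin : p ∈ stA.1
        · have hA : pvGA grid stA p = stA := by
            unfold pvGA
            rw [if_neg (by intro h; exact h.1 hin)]
          have hB : pvGB grid stB p = stB := by
            unfold pvGB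
            rw [if_neg (by intro h; exact h.2 ((hmem p).1 hin))]
          rw [hA, hB]
          exact ih hL' stA stB ⟨hmem, hclosed, htt⟩
        · -- a fresh Village cell: both sides explore its whole component
          have hpI' : pvInb grid (p.1, p.2) := hpI
          have hdfs := pvDfs_spec grid stA.1 p.1 p.2 hpI' hv hin
            (fun x y hx hs => hclosed x y hx hs)
          have hbfs := pvBfs_spec grid p.1 p.2 hpI' hv
          have hA : pvGA grid stA p =
              ((pvDfs grid p.1 p.2 stA.1 "Village").2,
                stA.2 ++ [(pvDfs grid p.1 p.2 stA.1 "Village").1]) := by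
            unfold pvGA
            rw [if_pos ⟨hin, hv⟩]
          set comp := pvBfs grid (grid.length : Int) ((PySem.List.pyGetD grid 0 []).length : Int)
              (grid.length * (PySem.List.pyGetD grid 0 []).length + 1) [p]
              (PySem.Set.ofList [p]) with hcompdef
          have hinB : p ∉ stB.1 := fun h => hin ((hmem p).2 h)
          have hB : pvGB grid stB p =
              (PySem.Set.union stB.1 comp, pvUpd (stB.2.1, stB.2.2) (PySem.Set.len comp)) := by
            unfold pvGB
            rw [if_pos ⟨hv, hinB⟩]
            simp only [pvUpd]
            split_ifs <;> rfl
          rw [hA, hB]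
          -- the two component lists are equal as sets, hence equal in size
          have hcompm : ∀ q, q ∈ comp ↔ pvReach grid (p.1, p.2) q := by
            intro q
            rw [hcompdef]
            exact hbfs.2 q
          have hsame : ∀ q, q ∈ (pvDfs grid p.1 p.2 stA.1 "Village").1 ↔ q ∈ comp := by
            intro q
            rw [(hdfs.2.1 q), hcompm q]
          have hlen : (pvDfs grid p.1 p.2 stA.1 "Village").1.length = comp.length := by
            have hperm : (pvDfs grid p.1 p.2 stA.1 "Village").1.Perm comp :=
              (List.perm_ext_iff_of_nodup hdfs.1 hbfs.1).2 hsame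
            exact hperm.length_eq
          apply ih hL'
          refine ⟨?_, ?_, ?_⟩
          · intro q
            rw [hdfs.2.2 q, PySem.Set.mem_union, hmem q, hsame q]
          · intro x y hx hs
            rcases (hdfs.2.2 x).1 hx with hx0 | hx1
            · exact (hdfs.2.2 y).2 (Or.inl (hclosed x y hx0 hs))
            · refine (hdfs.2.2 y).2 (Or.inr ?_)
              rw [hdfs.2.1] at hx1 ⊢
              exact Relation.ReflTransGen.tail hx1 hs
          · show pvUpd (stB.2.1, stB.2.2) (PySem.Set.len comp) = _
            rw [List.map_append, List.foldl_append, ← htt]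
            simp only [List.map_cons, List.map_nil, List.foldl_cons, List.foldl_nil]
            rw [pvSetLen_eq, ← hlen]
      · have hA : pvGA grid stA p = stA := by
          unfold pvGA
          rw [if_neg (by intro h; exact hv h.2)]
        have hB : pvGB grid stB p = stB := by
          unfold pvGB
          rw [if_neg (by intro h; exact hv h.1)]
        rw [hA, hB]
        exact ih hL' stA stB ⟨hmem, hclosed, htt⟩

theorem pvA_shape (grid : List (List String)) : shieldgate grid =
    (let st := (PySem.List.pyRange 0 (grid.length : Int) 1).foldl
        (fun st r => (PySem.List.pyRange 0 ((PySem.List.pyGetD grid 0 []).length : Int) 1).foldl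
          (fun st c => pvGA grid st (r, c)) st)
        ((PySem.Set.empty : PySem.Set (Int × Int)), ([] : List (List (Int × Int))));
     if 2 ≤ (PySem.List.sorted st.2 (fun cl => (cl.length : Int)) true).length
     then ((PySem.List.pyGetD (PySem.List.sorted st.2 (fun cl => (cl.length : Int)) true) 1
         []).length : Int) * 2
     else 0) := rfl

theorem pvB_shape (grid : List (List String)) (hne : grid ≠ []) : shieldgate_alt grid =
    ((PySem.List.pyRange 0 (grid.length : Int) 1).foldl
      (fun st r => (PySem.List.pyRange 0 ((PySem.List.pyGetD grid 0 []).length : Int) 1).foldl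
        (fun st c => pvGB grid st (r, c)) st)
      ((PySem.Set.empty : PySem.Set (Int × Int)), (0 : Int), (0 : Int))).2.2 * 2 := by
  have hEmp : grid.isEmpty = false := by
    simp [List.isEmpty_iff, hne]
  unfold shieldgate_alt
  simp only [hEmp, Bool.false_eq_true, if_false]
  rfl

-- ===== VERDICT (by name: the statement is the Claim_ definition above) =====
theorem shieldgate_spec : Claim_equal_shieldgate := by
  unfold Claim_equal_shieldgate
  intro grid hdom hpre
  unfold Spec_shieldgate
  by_cases hne : grid = []
  · subst hne
    decide
  · have hcells : ∀ p ∈ pvCellList grid, pvInb grid p :=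
      fun p hp => (mem_pvCellList grid p).1 hp
    have hinv0 : pvInv grid ((PySem.Set.empty : PySem.Set (Int × Int)),
        ([] : List (List (Int × Int))))
        ((PySem.Set.empty : PySem.Set (Int × Int)), (0 : Int), (0 : Int)) := by
      refine ⟨fun p => Iff.rfl, ?_, rfl⟩
      intro x y hx _
      exact absurd hx (List.not_mem_nil)
    have hmain := pvMain grid (pvCellList grid) hcells _ _ hinv0
    rw [pvA_shape grid, pvB_shape grid hne]
    rw [pvFoldNested, pvFoldNested]
    have hA := pvFinal ((pvCellList grid).foldl (pvGA grid)
      ((PySem.Set.empty : PySem.Set (Int × Int)), ([] : List (List (Int × Int))))).2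
    exact hA.trans (by rw [← hmain.2.2]; rfl)
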